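-- pv_equiv track=rewrite | github.com/oeg-upm/teresia-annotators | src/anotacion_dpej.py | filter_offsets_across_words
-- ===== SOURCE A (Python) =====
-- def filter_offsets_across_words(data):
--     """
--     Filters offsets across words, ensuring no offset for a word is included in the offsets of another word.
--
--     Args:
--         data (dict): Dictionary with words as keys and a list of (start, end) tuples as values.
--
--     Returns:
--         dict: A dictionary with filtered offsets where no offset is included in the offsets of another word.
--     """
--     filtered_data = {}
--
--     for current_word, current_offsets in data.items():
--         filtered_offsets = []
--
--         for current_offset in current_offsets:
--             start1, end1 = current_offset
--             is_contained = False
--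
--             for other_word, other_offsets in data.items():
--                 if current_word == other_word:
--                     continue  # Skip checking against the same word
--
--                 for start2, end2 in other_offsets:
--                     # Check if the current offset is fully contained within another offset
--                     if start1 >= start2 and end1 <= end2:
--                         is_contained = True
--                         # Only keep the longer one (current vs other)
--                         if end2 - start2 > end1 - start1:
--                             break
--
--             # Add the offset only if it is not contained within any other
--             if not is_contained:
--                 filtered_offsets.append(current_offset)
--
--         # Store the filtered offsets for the current word
--         filtered_data[current_word] = filtered_offsets
--
--     return filtered_data
-- ===== SOURCE B (Python) =====
-- def filter_offsets_across_words(data):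
--     # Plane-sweep over all (start, end, word) events sorted by start: maintain the
--     # maximal end seen so far together with its word, and the maximal end among
--     # intervals belonging to a different word; after absorbing each equal-start
--     # group, answer the containment query of every event in it.  O(N log N).
--     events = sorted(((s, e, w) for w, offs in data.items() for (s, e) in offs),
--                     key=lambda t: t[0])
--     contained = {}
--     best1 = None       # (max end so far, its word)
--     best2_end = None   # max end so far among intervals whose word != best1's word
--     n = len(events)
--     i = 0
--     while i < n:
--         start = events[i][0]
--         j = i
--         while j < n and events[j][0] == start:
--             j += 1
--         group = events[i:j]
--         i = j
--         for _, e, w in group: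
--             if best1 is None:
--                 best1 = (e, w)
--             elif w == best1[1]:
--                 if best1[0] < e:
--                     best1 = (e, w)
--             elif best1[0] < e:
--                 best2_end = best1[0]
--                 best1 = (e, w)
--             elif best2_end is None or best2_end < e:
--                 best2_end = e
--         for _, e, w in group:
--             if w != best1[1]:
--                 contained[(start, e, w)] = e <= best1[0]
--             else:
--                 contained[(start, e, w)] = best2_end is not None and e <= best2_end
--     return {w: [o for o in offs if not contained[(o[0], o[1], w)]]
--             for w, offs in data.items()}
-- ===== Notes on version B (the rewrite author's own statement) =====
-- stated objective: faster
-- what changed: Replaces A's per-offset rescan of every other word's offset list (three nested loops) by one plane-sweep: all (start, end, word) events are sorted by start once, and a running pair (maximal end with its word, maximal end among intervals of a different word) answers each containment query after its equal-start group is absorbed.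
import Mathlib
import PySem

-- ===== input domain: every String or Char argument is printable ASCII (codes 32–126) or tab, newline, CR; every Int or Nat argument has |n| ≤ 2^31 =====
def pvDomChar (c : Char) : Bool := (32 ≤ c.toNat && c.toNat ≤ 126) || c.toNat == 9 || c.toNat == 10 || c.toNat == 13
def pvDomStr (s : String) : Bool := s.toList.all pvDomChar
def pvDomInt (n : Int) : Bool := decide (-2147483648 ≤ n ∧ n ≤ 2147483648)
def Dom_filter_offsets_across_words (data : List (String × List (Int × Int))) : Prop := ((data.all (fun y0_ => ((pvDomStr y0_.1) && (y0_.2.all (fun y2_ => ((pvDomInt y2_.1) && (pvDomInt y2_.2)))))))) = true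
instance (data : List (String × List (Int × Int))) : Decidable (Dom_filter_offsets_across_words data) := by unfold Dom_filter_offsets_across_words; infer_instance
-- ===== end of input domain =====

-- B replaces A's per-offset scan over every other word's offsets by a single plane-sweep
-- over all (start, end, word) events sorted by start (objective: faster).

-- ===== PORT A =====
-- inner `for start2, end2 in other_offsets` loop with its `break` (early exit once the flag is true)
def pvInnerA (s1 e1 : Int) : List (Int × Int) → Bool → Bool
  | [], ic => ic
  | o :: rest, ic =>
    if s1 ≥ o.1 ∧ e1 ≤ o.2 then
      if o.2 - o.1 > e1 - s1 then true
      else pvInnerA s1 e1 rest true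
    else pvInnerA s1 e1 rest ic

-- `for other_word, other_offsets in data.items()` loop computing is_contained
def pvOtherA (items : List (String × List (Int × Int))) (cw : String) (s1 e1 : Int) : Bool :=
  items.foldl (fun ic p => if cw == p.1 then ic else pvInnerA s1 e1 p.2 ic) false

def filter_offsets_across_words (data : List (String × List (Int × Int))) : List (String × List (Int × Int)) :=
  let items := (PySem.Dict.ofList data).items  -- the dict's items (data is a Python dict)
  (items.foldl (fun fd (p : String × List (Int × Int)) =>
      fd.insert p.1 (p.2.foldl (fun acc (o : Int × Int) =>
        if pvOtherA items p.1 o.1 o.2 then acc else acc ++ [o]) []))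
    (PySem.Dict.empty : PySem.Dict String (List (Int × Int)))).items

-- ===== PORT B =====
-- absorb one event into (best1, best2_end)
def pvUpdB (b : Option (Int × String) × Option Int) (t : Int × Int × String) :
    Option (Int × String) × Option Int :=
  match b.1 with
  | none => (some (t.2.1, t.2.2), b.2)
  | some b1 =>
    if t.2.2 == b1.2 then
      if b1.1 < t.2.1 then (some (t.2.1, t.2.2), b.2) else (some b1, b.2)
    else if b1.1 < t.2.1 then (some (t.2.1, t.2.2), some b1.1)
    else
      match b.2 with
      | none => (some b1, some t.2.1)
      | some v => if v < t.2.1 then (some b1, some t.2.1) else (some b1, b.2)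

-- the containment answer for an event with end e and word w
-- (b1 = none is unreachable: best1 is set before any query since the group is nonempty)
def pvQueryB (b1 : Option (Int × String)) (b2 : Option Int) (e : Int) (w : String) : Bool :=
  match b1 with
  | none => false
  | some b =>
    if !(w == b.2) then decide (e ≤ b.1)
    else match b2 with
      | none => false
      | some v => decide (e ≤ v)

-- the outer `while i < n` loop: peel one equal-start group, update bests, answer its queries
def pvSweepB (b1 : Option (Int × String)) (b2 : Option Int)
    (c : PySem.Dict (Int × Int × String) Bool) :
    List (Int × Int × String) → PySem.Dict (Int × Int × String) Bool
  | [] => c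
  | t :: rest =>
    let grp := t :: rest.takeWhile (fun u => u.1 == t.1)
    let b := grp.foldl pvUpdB (b1, b2)
    let c' := grp.foldl (fun c u => c.insert u (pvQueryB b.1 b.2 u.2.1 u.2.2)) c
    pvSweepB b.1 b.2 c' (rest.dropWhile (fun u => u.1 == t.1))
  termination_by l => l.length
  decreasing_by
    simp only [List.length_cons]
    have := rest.length_dropWhile_le (fun u => u.1 == t.1)
    omega

def filter_offsets_across_words_alt (data : List (String × List (Int × Int))) : List (String × List (Int × Int)) :=
  let items := (PySem.Dict.ofList data).items  -- the dict's items (data is a Python dict)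
  let events := PySem.List.sorted
    (items.flatMap (fun p => p.2.map (fun o => (o.1, o.2, p.1)))) (fun t => t.1) false
  let c := pvSweepB none none PySem.Dict.empty events
  (items.foldl (fun fd (p : String × List (Int × Int)) =>
      fd.insert p.1 (p.2.filter (fun o => !(c.getD (o.1, o.2, p.1) false))))
    (PySem.Dict.empty : PySem.Dict String (List (Int × Int)))).items

-- ===== PRECONDITION & SPEC =====
def Spec_filter_offsets_across_words (data : List (String × List (Int × Int))) (out : List (String × List (Int × Int))) : Prop := out = filter_offsets_across_words_alt data
instance (data : List (String × List (Int × Int))) (out : List (String × List (Int × Int))) : Decidable (Spec_filter_offsets_across_words data out) := by unfold Spec_filter_offsets_across_words; infer_instance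

-- ===== CLAIM (what is proved, stated in full; the proofs are below) =====
def Claim_equal_filter_offsets_across_words : Prop := ∀ (data : List (String × List (Int × Int))), Dom_filter_offsets_across_words data → Spec_filter_offsets_across_words data (filter_offsets_across_words data)

-- ===== LEMMAS AND PROOFS =====

-- the containment predicate both programs compute: some offset of a DIFFERENT word covers (s, e)
def pvCont (items : List (String × List (Int × Int))) (w : String) (s e : Int) : Bool :=
  items.any (fun p => !(w == p.1) && p.2.any (fun o => decide (s ≥ o.1 ∧ e ≤ o.2)))

lemma pvInnerA_eq (s e : Int) (l : List (Int × Int)) (ic : Bool) :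
    pvInnerA s e l ic = (ic || l.any (fun o => decide (s ≥ o.1 ∧ e ≤ o.2))) := by
  induction l generalizing ic with
  | nil => simp [pvInnerA]
  | cons o rest ih =>
    simp only [pvInnerA, List.any_cons]
    by_cases h : s ≥ o.1 ∧ e ≤ o.2
    · simp only [if_pos h, ih]
      split_ifs <;> simp [h]
    · simp [ih, h]

lemma pvOtherA_eq (items : List (String × List (Int × Int))) (w : String) (s e : Int) :
    pvOtherA items w s e = pvCont items w s e := by
  have key : ∀ (l : List (String × List (Int × Int))) (ic : Bool),
      l.foldl (fun ic p => if w == p.1 then ic else pvInnerA s e p.2 ic) ic =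
        (ic || l.any (fun p => !(w == p.1) && p.2.any (fun o => decide (s ≥ o.1 ∧ e ≤ o.2)))) := by
    intro l
    induction l with
    | nil => simp
    | cons p rest ih =>
      intro ic
      rw [List.foldl_cons, List.any_cons]
      by_cases h : (w == p.1 : Bool)
      · rw [if_pos h, ih]; simp [h]
      · rw [if_neg h, pvInnerA_eq, ih]; simp [h, Bool.or_assoc]
  unfold pvOtherA pvCont
  rw [key]
  simp

-- invariant of the sweep state over the processed events P
def pvInv (P : List (Int × Int × String)) (b1 : Option (Int × String)) (b2 : Option Int) : Prop :=
  match b1 with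
  | none => P = [] ∧ b2 = none
  | some b =>
    (∃ t ∈ P, t.2.1 = b.1 ∧ t.2.2 = b.2) ∧ (∀ t ∈ P, t.2.1 ≤ b.1) ∧
    (match b2 with
     | none => ∀ t ∈ P, t.2.2 = b.2
     | some v => (∃ t ∈ P, t.2.2 ≠ b.2 ∧ t.2.1 = v) ∧ (∀ t ∈ P, t.2.2 ≠ b.2 → t.2.1 ≤ v))

lemma pvInv_upd (P : List (Int × Int × String)) (b1 : Option (Int × String)) (b2 : Option Int)
    (t : Int × Int × String) (h : pvInv P b1 b2) :
    pvInv (P ++ [t]) (pvUpdB (b1, b2) t).1 (pvUpdB (b1, b2) t).2 := by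
  cases b1 with
  | none =>
    obtain ⟨hP, hb2⟩ := h
    subst hP; subst hb2
    have hr : pvUpdB ((none : Option (Int × String)), (none : Option Int)) t
        = (some (t.2.1, t.2.2), none) := by simp [pvUpdB]
    rw [hr]
    exact ⟨⟨t, by simp, rfl, rfl⟩, by simp, by simp⟩
  | some b =>
    obtain ⟨⟨m, hm, hme, hmw⟩, hub, h2⟩ := h
    by_cases hw : t.2.2 = b.2
    · by_cases hlt : b.1 < t.2.1
      · have hr : pvUpdB (some b, b2) t = (some (t.2.1, t.2.2), b2) := by
          simp [pvUpdB, hw, hlt]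
        rw [hr]
        refine ⟨⟨t, by simp, rfl, rfl⟩, ?_, ?_⟩
        · intro u hu
          rcases List.mem_append.mp hu with h' | h'
          · exact le_of_lt (lt_of_le_of_lt (hub u h') hlt)
          · simp only [List.mem_singleton] at h'; subst h'; exact le_refl _
        · cases b2 with
          | none =>
            intro u hu
            rcases List.mem_append.mp hu with h' | h'
            · rw [h2 u h', hw]
            · simp only [List.mem_singleton] at h'; subst h'; rfl
          | some v =>
            obtain ⟨⟨m2, hm2, hm2w, hm2e⟩, hub2⟩ := h2
            refine ⟨⟨m2, by simp [hm2], by simpa [hw] using hm2w, hm2e⟩, ?_⟩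
            intro u hu hne
            rcases List.mem_append.mp hu with h' | h'
            · exact hub2 u h' (by simpa [hw] using hne)
            · simp only [List.mem_singleton] at h'; subst h'; exact absurd rfl hne
      · have hr : pvUpdB (some b, b2) t = (some b, b2) := by
          simp [pvUpdB, hw, hlt]
        rw [hr]
        refine ⟨⟨m, by simp [hm], hme, hmw⟩, ?_, ?_⟩
        · intro u hu
          rcases List.mem_append.mp hu with h' | h'
          · exact hub u h'
          · simp only [List.mem_singleton] at h'; subst h'; omega
        · cases b2 with
          | none =>
            intro u hu
            rcases List.mem_append.mp hu with h' | h'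
            · exact h2 u h'
            · simp only [List.mem_singleton] at h'; subst h'; exact hw
          | some v =>
            obtain ⟨⟨m2, hm2, hm2w, hm2e⟩, hub2⟩ := h2
            refine ⟨⟨m2, by simp [hm2], hm2w, hm2e⟩, ?_⟩
            intro u hu hne
            rcases List.mem_append.mp hu with h' | h'
            · exact hub2 u h' hne
            · simp only [List.mem_singleton] at h'; subst h'; exact absurd hw hne
    · by_cases hlt : b.1 < t.2.1
      · have hr : pvUpdB (some b, b2) t = (some (t.2.1, t.2.2), some b.1) := by
          simp [pvUpdB, hw, hlt]
        rw [hr]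
        refine ⟨⟨t, by simp, rfl, rfl⟩, ?_, ⟨⟨m, by simp [hm], ?_, hme⟩, ?_⟩⟩
        · intro u hu
          rcases List.mem_append.mp hu with h' | h'
          · exact le_of_lt (lt_of_le_of_lt (hub u h') hlt)
          · simp only [List.mem_singleton] at h'; subst h'; exact le_refl _
        · rw [hmw]; exact fun h' => hw h'.symm
        · intro u hu hne
          rcases List.mem_append.mp hu with h' | h'
          · exact hub u h'
          · simp only [List.mem_singleton] at h'; subst h'; exact absurd rfl hne
      · cases b2 with
        | none =>
          have hr : pvUpdB (some b, (none : Option Int)) t = (some b, some t.2.1) := by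
            simp [pvUpdB, hw, hlt]
          rw [hr]
          refine ⟨⟨m, by simp [hm], hme, hmw⟩, ?_, ⟨⟨t, by simp, hw, rfl⟩, ?_⟩⟩
          · intro u hu
            rcases List.mem_append.mp hu with h' | h'
            · exact hub u h'
            · simp only [List.mem_singleton] at h'; subst h'; omega
          · intro u hu hne
            rcases List.mem_append.mp hu with h' | h'
            · exact absurd (h2 u h') hne
            · simp only [List.mem_singleton] at h'; subst h'; exact le_refl _
        | some v =>
          obtain ⟨⟨m2, hm2, hm2w, hm2e⟩, hub2⟩ := h2
          by_cases hv : v < t.2.1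
          · have hr : pvUpdB (some b, some v) t = (some b, some t.2.1) := by
              simp [pvUpdB, hw, hlt, hv]
            rw [hr]
            refine ⟨⟨m, by simp [hm], hme, hmw⟩, ?_, ⟨⟨t, by simp, hw, rfl⟩, ?_⟩⟩
            · intro u hu
              rcases List.mem_append.mp hu with h' | h'
              · exact hub u h'
              · simp only [List.mem_singleton] at h'; subst h'; omega
            · intro u hu hne
              rcases List.mem_append.mp hu with h' | h'
              · exact le_of_lt (lt_of_le_of_lt (hub2 u h' hne) hv)
              · simp only [List.mem_singleton] at h'; subst h'; exact le_refl _
          · have hr : pvUpdB (some b, some v) t = (some b, some v) := by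
              simp [pvUpdB, hw, hlt, hv]
            rw [hr]
            refine ⟨⟨m, by simp [hm], hme, hmw⟩, ?_, ⟨⟨m2, by simp [hm2], hm2w, hm2e⟩, ?_⟩⟩
            · intro u hu
              rcases List.mem_append.mp hu with h' | h'
              · exact hub u h'
              · simp only [List.mem_singleton] at h'; subst h'; omega
            · intro u hu hne
              rcases List.mem_append.mp hu with h' | h'
              · exact hub2 u h' hne
              · simp only [List.mem_singleton] at h'; subst h'; omega

lemma pvInv_foldl (G P : List (Int × Int × String)) (b1 : Option (Int × String)) (b2 : Option Int)
    (h : pvInv P b1 b2) :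
    pvInv (P ++ G) (G.foldl pvUpdB (b1, b2)).1 (G.foldl pvUpdB (b1, b2)).2 := by
  induction G generalizing P b1 b2 with
  | nil => simpa using h
  | cons t G ih =>
    have h1 := pvInv_upd P b1 b2 t h
    have := ih (P ++ [t]) (pvUpdB (b1, b2) t).1 (pvUpdB (b1, b2) t).2 h1
    simpa [List.append_assoc] using this

lemma pvQueryB_eq (P : List (Int × Int × String)) (b1 : Option (Int × String)) (b2 : Option Int)
    (h : pvInv P b1 b2) (e : Int) (w : String) :
    pvQueryB b1 b2 e w = P.any (fun t => !(w == t.2.2) && decide (e ≤ t.2.1)) := by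
  cases b1 with
  | none =>
    obtain ⟨hP, -⟩ := h
    subst hP; rfl
  | some b =>
    obtain ⟨⟨m, hm, hme, hmw⟩, hub, h2⟩ := h
    apply Bool.eq_iff_iff.mpr
    rw [List.any_eq_true]
    by_cases hw : w = b.2
    · subst hw
      simp only [pvQueryB, beq_self_eq_true, Bool.not_true, Bool.false_eq_true, if_false]
      cases b2 with
      | none =>
        simp only [Bool.false_eq_true, false_iff]
        rintro ⟨u, hu, hh⟩
        rw [h2 u hu] at hh
        simp at hh
      | some v =>
        obtain ⟨⟨m2, hm2, hm2w, hm2e⟩, hub2⟩ := h2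
        constructor
        · intro hev
          exact ⟨m2, hm2, by
            simp only [Bool.and_eq_true, Bool.not_eq_true', beq_eq_false_iff_ne,
              decide_eq_true_eq]
            exact ⟨fun h' => hm2w h'.symm, by rw [hm2e]; exact of_decide_eq_true hev⟩⟩
        · rintro ⟨u, hu, hh⟩
          simp only [Bool.and_eq_true, Bool.not_eq_true', beq_eq_false_iff_ne,
            decide_eq_true_eq] at hh ⊢
          exact le_trans hh.2 (hub2 u hu (fun h' => hh.1 h'.symm))
    · simp only [pvQueryB, show (w == b.2) = false from beq_eq_false_iff_ne.mpr hw,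
        Bool.not_false, if_true]
      constructor
      · intro hev
        exact ⟨m, hm, by
          simp only [Bool.and_eq_true, Bool.not_eq_true', beq_eq_false_iff_ne,
            decide_eq_true_eq]
          exact ⟨by rw [hmw]; exact hw, by rw [hme]; exact of_decide_eq_true hev⟩⟩
      · rintro ⟨u, hu, hh⟩
        simp only [Bool.and_eq_true, decide_eq_true_eq] at hh ⊢
        exact le_trans hh.2 (hub u hu)

lemma pvFoldlInsert_not_mem (G : List (Int × Int × String))
    (f : Int × Int × String → Bool) (c : PySem.Dict (Int × Int × String) Bool)
    (k : Int × Int × String) (hk : k ∉ G) :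
    (G.foldl (fun c u => c.insert u (f u)) c).getD k false = c.getD k false := by
  induction G generalizing c with
  | nil => rfl
  | cons u G ih =>
    simp only [List.foldl_cons]
    rw [ih _ (by simp_all)]
    rw [PySem.Dict.getD_insert]
    simp_all

lemma pvFoldlInsert_mem (G : List (Int × Int × String))
    (f : Int × Int × String → Bool) (c : PySem.Dict (Int × Int × String) Bool)
    (k : Int × Int × String) (hk : k ∈ G) :
    (G.foldl (fun c u => c.insert u (f u)) c).getD k false = f k := by
  induction G generalizing c with
  | nil => simp at hk
  | cons u G ih =>
    simp only [List.foldl_cons]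
    by_cases h : k ∈ G
    · exact ih _ h
    · have hku : k = u := by simp_all
      rw [hku, pvFoldlInsert_not_mem G f (c.insert u (f u)) u (hku ▸ h),
        PySem.Dict.getD_insert_self]


-- a key whose start is below every remaining start is never touched again
lemma pvSweepB_frozen (R : List (Int × Int × String)) (b1 : Option (Int × String)) (b2 : Option Int)
    (c : PySem.Dict (Int × Int × String) Bool) (k : Int × Int × String)
    (hk : ∀ u ∈ R, k.1 < u.1) :
    (pvSweepB b1 b2 c R).getD k false = c.getD k false := by
  have aux : ∀ (n : Nat) (R : List (Int × Int × String)), R.length ≤ n →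
      ∀ (b1 : Option (Int × String)) (b2 : Option Int)
        (c : PySem.Dict (Int × Int × String) Bool),
      (∀ u ∈ R, k.1 < u.1) →
      (pvSweepB b1 b2 c R).getD k false = c.getD k false := by
    intro n
    induction n with
    | zero =>
      intro R hR b1 b2 c hk
      have : R = [] := List.eq_nil_of_length_eq_zero (Nat.le_zero.mp hR)
      subst this
      rw [pvSweepB]
    | succ n ih =>
      intro R hR b1 b2 c hk
      cases R with
      | nil => rw [pvSweepB]
      | cons t rest =>
        simp only [pvSweepB]
        have hgrp : ∀ u ∈ t :: rest.takeWhile (fun u => u.1 == t.1), k.1 < u.1 := by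
          intro u hu
          rcases List.mem_cons.mp hu with h' | h'
          · rw [h']; exact hk t (by simp)
          · exact hk u (List.mem_cons_of_mem _ ((List.takeWhile_sublist _).mem h'))
        rw [ih _ (by
              have := rest.length_dropWhile_le (fun u => u.1 == t.1)
              simp only [List.length_cons] at hR
              omega) _ _ _
            (fun u hu => hk u (List.mem_cons_of_mem _ ((List.dropWhile_sublist _).mem hu)))]
        exact pvFoldlInsert_not_mem _ _ _ _ (fun hmem => lt_irrefl _ (hgrp k hmem))
  exact aux R.length R (le_refl _) b1 b2 c hk

-- the main sweep lemma
lemma pvSweepB_spec (R P : List (Int × Int × String)) (b1 : Option (Int × String)) (b2 : Option Int)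
    (c : PySem.Dict (Int × Int × String) Bool)
    (hinv : pvInv P b1 b2)
    (hsort : R.Pairwise (fun a b => a.1 ≤ b.1))
    (hPR : ∀ t ∈ P, ∀ u ∈ R, t.1 < u.1)
    (k : Int × Int × String) (hk : k ∈ R) :
    (pvSweepB b1 b2 c R).getD k false =
      (P ++ R).any (fun t => decide (t.1 ≤ k.1) && !(k.2.2 == t.2.2) && decide (k.2.1 ≤ t.2.1)) := by
  have aux : ∀ (n : Nat) (R : List (Int × Int × String)), R.length ≤ n →
      ∀ (P : List (Int × Int × String)) (b1 : Option (Int × String)) (b2 : Option Int)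
        (c : PySem.Dict (Int × Int × String) Bool),
      pvInv P b1 b2 →
      R.Pairwise (fun a b => a.1 ≤ b.1) →
      (∀ t ∈ P, ∀ u ∈ R, t.1 < u.1) →
      ∀ k ∈ R, (pvSweepB b1 b2 c R).getD k false =
        (P ++ R).any (fun t => decide (t.1 ≤ k.1) && !(k.2.2 == t.2.2) && decide (k.2.1 ≤ t.2.1)) := by
    intro n
    induction n with
    | zero =>
      intro R hR P b1 b2 c hinv hsort hPR k hk
      have : R = [] := List.eq_nil_of_length_eq_zero (Nat.le_zero.mp hR)
      subst this; simp at hk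
    | succ n ih =>
      intro R hR P b1 b2 c hinv hsort hPR k hk
      cases R with
      | nil => simp at hk
      | cons t rest =>
        simp only [pvSweepB]
        -- notation for the equal-start group and the strictly-later remainder
        have hsplit : (t :: rest.takeWhile (fun u => u.1 == t.1)) ++
            rest.dropWhile (fun u => u.1 == t.1) = t :: rest := by
          simp [List.takeWhile_append_dropWhile]
        have hgrp_start : ∀ u ∈ t :: rest.takeWhile (fun u => u.1 == t.1), u.1 = t.1 := by
          intro u hu
          rcases List.mem_cons.mp hu with h' | h'
          · subst h'; rfl
          · have hb := List.mem_takeWhile_imp h'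
            exact eq_of_beq hb
        have hrest_mem : ∀ u ∈ rest.dropWhile (fun u => u.1 == t.1), u ∈ rest :=
          fun u hu => (List.dropWhile_sublist _).mem hu
        have hrest_gt : ∀ u ∈ rest.dropWhile (fun u => u.1 == t.1), t.1 < u.1 := by
          intro u hu
          have hle : t.1 ≤ u.1 := (List.pairwise_cons.mp hsort).1 u (hrest_mem u hu)
          rcases hdrop : rest.dropWhile (fun u => u.1 == t.1) with _ | ⟨d, ds⟩
          · rw [hdrop] at hu; simp at hu
          · have hd : ¬ (d.1 == t.1) = true := by
              have := List.head?_dropWhile_not (fun u => u.1 == t.1) rest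
              rw [hdrop] at this; simpa using this
            have hdle : t.1 ≤ d.1 := (List.pairwise_cons.mp hsort).1 d (hrest_mem d (by rw [hdrop]; simp))
            have hdlt : t.1 < d.1 := lt_of_le_of_ne hdle (fun h' => hd (by simp [h'.symm]))
            rw [hdrop] at hu
            rcases List.mem_cons.mp hu with h' | h'
            · subst h'; exact hdlt
            · have hpw : (d :: ds).Pairwise (fun a b : Int × Int × String => a.1 ≤ b.1) := by
                have := List.Pairwise.sublist (List.dropWhile_sublist (fun u => u.1 == t.1) (l := rest)) hsort.of_cons
                rwa [hdrop] at this
              exact lt_of_lt_of_le hdlt ((List.pairwise_cons.mp hpw).1 u h')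
        have hinv' := pvInv_foldl (t :: rest.takeWhile (fun u => u.1 == t.1)) P b1 b2 hinv
        have hkmem : k ∈ (t :: rest.takeWhile (fun u => u.1 == t.1)) ++
            rest.dropWhile (fun u => u.1 == t.1) := by rw [hsplit]; exact hk
        rcases List.mem_append.mp hkmem with hkg | hkr
        · -- k belongs to the current group: its answer is frozen from here on
          have hk1 : k.1 = t.1 := hgrp_start k hkg
          rw [pvSweepB_frozen _ _ _ _ _ (fun u hu => hk1 ▸ hrest_gt u hu)]
          rw [pvFoldlInsert_mem _ _ _ _ hkg]
          rw [pvQueryB_eq _ _ _ hinv']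
          apply Bool.eq_iff_iff.mpr
          simp only [List.any_eq_true, List.mem_append, Bool.and_eq_true,
            Bool.not_eq_true', beq_eq_false_iff_ne, decide_eq_true_eq, and_assoc]
          constructor
          · rintro ⟨u, hu, huw, hue⟩
            refine ⟨u, ?_, ?_, huw, hue⟩
            · rcases hu with hu | hu
              · exact Or.inl hu
              · refine Or.inr ?_
                rw [← hsplit]
                exact List.mem_append.mpr (Or.inl hu)
            · rcases hu with hu | hu
              · exact le_of_lt (hPR u hu k hk)
              · rw [hgrp_start u hu, hk1]
          · rintro ⟨u, hu, hule, huw, hue⟩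
            refine ⟨u, ?_, huw, hue⟩
            rcases hu with hu | hu
            · exact Or.inl hu
            · have hu2 : u ∈ (t :: rest.takeWhile (fun u => u.1 == t.1)) ++
                  rest.dropWhile (fun u => u.1 == t.1) := by rw [hsplit]; exact hu
              rcases List.mem_append.mp hu2 with h' | h'
              · exact Or.inr h'
              · exact absurd hule (not_le.mpr (hk1 ▸ hrest_gt u h'))
        · -- k comes strictly later: recurse with the extended processed prefix
          rw [ih _ (by
                have := rest.length_dropWhile_le (fun u => u.1 == t.1)
                simp only [List.length_cons] at hR
                omega)
              (P ++ (t :: rest.takeWhile (fun u => u.1 == t.1)))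
              _ _ _ hinv'
              (List.Pairwise.sublist (List.dropWhile_sublist _) hsort.of_cons)
              (by
                intro x hx u hu
                rcases List.mem_append.mp hx with hx | hx
                · exact hPR x hx u (List.mem_cons_of_mem _ (hrest_mem u hu))
                · exact (hgrp_start x hx) ▸ hrest_gt u hu)
              k hkr]
          rw [List.append_assoc, hsplit]
  exact aux R.length R (le_refl _) P b1 b2 c hinv hsort hPR k hk

-- A's append-accumulator loop over the current word's offsets is a filter
lemma pvKeepLoop (q : Int × Int → Bool) (l : List (Int × Int)) :
    l.foldl (fun acc o => if q o then acc else acc ++ [o]) [] = l.filter (fun o => !q o) := by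
  have h := PySem.List.foldl_append_if_eq_filter (fun o => !q o) l []
  rw [List.nil_append] at h
  rw [← h]
  apply PySem.List.foldl_congr_mem
  intro acc x hx
  cases hq : q x <;> simp_all

-- the sweep's answer for an offset of word w is exactly the containment predicate
lemma pvGetD_sweep (items : List (String × List (Int × Int))) (w : String) (s e : Int)
    (hmem : (s, e, w) ∈ items.flatMap (fun p => p.2.map (fun o => (o.1, o.2, p.1)))) :
    (pvSweepB none none PySem.Dict.empty
        (PySem.List.sorted (items.flatMap (fun p => p.2.map (fun o => (o.1, o.2, p.1))))
          (fun t => t.1) false)).getD (s, e, w) false = pvCont items w s e := by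
  have hk : (s, e, w) ∈ PySem.List.sorted
      (items.flatMap (fun p => p.2.map (fun o => (o.1, o.2, p.1)))) (fun t => t.1) false :=
    (PySem.List.mem_sorted _ _ _ _).mpr hmem
  have hpw := PySem.List.sorted_pairwise
    (items.flatMap (fun p => p.2.map (fun o => (o.1, o.2, p.1)))) (fun t => t.1)
  have h := pvSweepB_spec _ [] none none PySem.Dict.empty ⟨rfl, rfl⟩ hpw (by simp) (s, e, w) hk
  rw [h]
  apply Bool.eq_iff_iff.mpr
  simp only [List.nil_append, List.any_eq_true, PySem.List.mem_sorted, List.mem_flatMap,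
    List.mem_map, pvCont, Bool.and_eq_true, Bool.not_eq_true', beq_eq_false_iff_ne,
    decide_eq_true_eq, ge_iff_le, and_assoc]
  constructor
  · rintro ⟨t, ⟨p, hp, o, ho, rfl⟩, hle, hne, he⟩
    exact ⟨p, hp, hne, o, ho, hle, he⟩
  · rintro ⟨p, hp, hne, o, ho, hle, he⟩
    exact ⟨(o.1, o.2, p.1), ⟨p, hp, o, ho, rfl⟩, hle, hne, he⟩

theorem filter_offsets_across_words_spec : Claim_equal_filter_offsets_across_words := by
  intro data _
  unfold Spec_filter_offsets_across_words filter_offsets_across_words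
    filter_offsets_across_words_alt
  dsimp only
  congr 1
  apply PySem.List.foldl_congr_mem
  intro fd p hp
  congr 1
  rw [pvKeepLoop (fun o => pvOtherA (PySem.Dict.ofList data).items p.1 o.1 o.2) p.2]
  apply List.filter_congr
  intro o ho
  have hmem : (o.1, o.2, p.1) ∈ (PySem.Dict.ofList data).items.flatMap
      (fun p => p.2.map (fun o => (o.1, o.2, p.1))) :=
    List.mem_flatMap.mpr ⟨p, hp, List.mem_map.mpr ⟨o, ho, rfl⟩⟩
  rw [pvOtherA_eq, pvGetD_sweep _ _ _ _ hmem]
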